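-- pv_equiv track=rewrite | github.com/ARCAlhau80/LotoScope | lotofacil_lite/ia/agente_hibrido_v3.py | _calcular_consecutivos
-- ===== SOURCE A (Python) =====
-- from typing import List, Dict, Set, Tuple, Optional
--
-- def _calcular_consecutivos(resultados: List[Dict]) -> Dict[int, int]:
--     """Conta aparições consecutivas de cada número"""
--     consecutivos = {n: 0 for n in range(1, 26)}
--     for n in range(1, 26):
--         for r in resultados:
--             if n in r['numeros']:
--                 consecutivos[n] += 1
--             else:
--                 break
--     return consecutivos
-- ===== SOURCE B (Python) =====
-- from typing import List, Dict
--
-- def _calcular_consecutivos(resultados: List[Dict]) -> Dict[int, int]: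
--     """Conta aparições consecutivas de cada número (single forward pass)"""
--     consecutivos = {n: 0 for n in range(1, 26)}
--     alive = list(range(1, 26))
--     for r in resultados:
--         if not alive:
--             break
--         nums = r['numeros']
--         still = []
--         for n in alive:
--             if n in nums:
--                 consecutivos[n] += 1
--                 still.append(n)
--         alive = still
--     return consecutivos
-- ===== Notes on version B (the rewrite author's own statement) =====
-- stated objective: alternative
-- what changed: Replaces A's 25 separate prefix scans of resultados with one forward pass over resultados that maintains the set of numbers still on a streak (as a list) and stops as soon as it is empty.
import Mathlib
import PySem

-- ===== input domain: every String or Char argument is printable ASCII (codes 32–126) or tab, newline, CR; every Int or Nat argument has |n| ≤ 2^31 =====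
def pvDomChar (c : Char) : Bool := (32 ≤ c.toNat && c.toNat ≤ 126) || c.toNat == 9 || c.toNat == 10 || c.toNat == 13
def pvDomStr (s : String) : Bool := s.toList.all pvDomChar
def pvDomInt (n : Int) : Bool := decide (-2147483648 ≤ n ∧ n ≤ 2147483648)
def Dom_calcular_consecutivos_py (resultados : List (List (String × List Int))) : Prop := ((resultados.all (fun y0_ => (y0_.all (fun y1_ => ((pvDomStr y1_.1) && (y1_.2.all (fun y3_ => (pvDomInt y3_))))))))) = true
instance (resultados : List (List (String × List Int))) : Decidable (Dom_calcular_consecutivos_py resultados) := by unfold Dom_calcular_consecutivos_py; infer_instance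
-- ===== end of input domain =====

-- B replaces A's 25 per-number prefix scans with one forward pass carrying the list of
-- numbers still on a streak (objective: alternative decomposition; return value only).

-- ===== PORT A =====
-- r['numeros'] : under Pre_ the key is present; getD's default is never used there
def pvNums (r : List (String × List Int)) : List Int :=
  PySem.Dict.getD (PySem.Dict.mk r) "numeros" []

-- 'for r in resultados: if n in r['numeros']: consecutivos[n] += 1 else: break'
def pvInnerA (n : Int) (rs : List (List (String × List Int)))
    (d : PySem.Dict Int Int) : PySem.Dict Int Int :=
  match rs with
  | [] => d
  | r :: rest =>
    if (pvNums r).contains n then pvInnerA n rest (d.modify n 0 (· + 1))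
    else d

def calcular_consecutivos_py (resultados : List (List (String × List Int))) : List (Int × Int) :=
  let consecutivos : PySem.Dict Int Int :=
    (PySem.List.pyRange 1 26 1).foldl (fun d n => d.insert n 0) PySem.Dict.empty
  ((PySem.List.pyRange 1 26 1).foldl (fun d n => pvInnerA n resultados d) consecutivos).items

-- ===== PORT B =====
-- r['numeros'] on B's side (same lookup Python B performs)
def pvNumsB (r : List (String × List Int)) : List Int :=
  PySem.Dict.getD (PySem.Dict.mk r) "numeros" []

-- one result: for n in alive: if n in nums: consecutivos[n] += 1; still.append(n)
def pvStepB (nums : List Int) (d : PySem.Dict Int Int) (alive : List Int) :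
    PySem.Dict Int Int × List Int :=
  alive.foldl (fun p n =>
    if nums.contains n then (p.1.modify n 0 (· + 1), p.2 ++ [n]) else p) (d, [])

def pvLoopB (rs : List (List (String × List Int)))
    (d : PySem.Dict Int Int) (alive : List Int) : PySem.Dict Int Int :=
  match rs with
  | [] => d
  | r :: rest =>
    if alive.isEmpty then d
    else
      let p := pvStepB (pvNumsB r) d alive
      pvLoopB rest p.1 p.2

def calcular_consecutivos_py_alt (resultados : List (List (String × List Int))) : List (Int × Int) :=
  let consecutivos : PySem.Dict Int Int :=
    (PySem.List.pyRange 1 26 1).foldl (fun d n => d.insert n 0) PySem.Dict.empty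
  (pvLoopB resultados consecutivos (PySem.List.pyRange 1 26 1)).items

-- ===== PRECONDITION & SPEC =====
-- Pre_ holds exactly where Python A returns: it fails only when some result dict lacking the
-- key 'numeros' is reached, i.e. some number 1..25 appears in every earlier result's 'numeros'
-- (there Python raises KeyError; B raises KeyError at the same dict).
def Pre_calcular_consecutivos_py (resultados : List (List (String × List Int))) : Prop :=
  ∀ i ∈ List.range resultados.length,
    (PySem.Dict.get? (PySem.Dict.mk (resultados.getD i [])) "numeros").isNone = true →
    ∀ n ∈ PySem.List.pyRange 1 26 1,
      ∃ j ∈ List.range i,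
        (PySem.Dict.getD (PySem.Dict.mk (resultados.getD j [])) "numeros" []).contains n = false
instance (resultados : List (List (String × List Int))) : Decidable (Pre_calcular_consecutivos_py resultados) := by unfold Pre_calcular_consecutivos_py; infer_instance

def pvWitness_calcular_consecutivos_py : (List (List (String × List Int))) :=
  [[("numeros", [1, 2, 3])], [("numeros", [2, 24])]]

def Spec_calcular_consecutivos_py (resultados : List (List (String × List Int))) (out : List (Int × Int)) : Prop := out = calcular_consecutivos_py_alt resultados
instance (resultados : List (List (String × List Int))) (out : List (Int × Int)) : Decidable (Spec_calcular_consecutivos_py resultados out) := by unfold Spec_calcular_consecutivos_py; infer_instance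

-- ===== CLAIM (what is proved, stated in full; the proofs are below) =====
def Claim_equal_calcular_consecutivos_py : Prop := ∀ (resultados : List (List (String × List Int))), Dom_calcular_consecutivos_py resultados → Pre_calcular_consecutivos_py resultados → Spec_calcular_consecutivos_py resultados (calcular_consecutivos_py resultados)

-- ===== LEMMAS AND PROOFS =====

-- length of the prefix of rs on which n keeps appearing (the value both ports compute)
def pvPc (n : Int) : List (List (String × List Int)) → Int
  | [] => 0
  | r :: rest => if (pvNums r).contains n then pvPc n rest + 1 else 0

def pvL : List Int := PySem.List.pyRange 1 26 1

theorem pvL_nodup : pvL.Nodup := by decide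

-- the initial dict {n: 0}
def pvInit : PySem.Dict Int Int := pvL.foldl (fun d n => d.insert n 0) PySem.Dict.empty

theorem pvInit_keys : pvInit.keys = pvL := by decide

theorem pvInit_getD (m : Int) : pvInit.getD m 0 = 0 := by
  have h : ∀ (ks : List Int) (d : PySem.Dict Int Int), d.getD m 0 = 0 →
      (ks.foldl (fun d n => d.insert n 0) d).getD m 0 = 0 := by
    intro ks
    induction ks with
    | nil => intro d h; simpa using h
    | cons k ks ih =>
      intro d h
      simp only [List.foldl_cons]
      exact ih _ (by rw [PySem.Dict.getD_insert]; split <;> simp [h])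
  exact h pvL PySem.Dict.empty (by simp [pysem])

theorem pvInnerA_keys (n : Int) (rs : List (List (String × List Int)))
    (d : PySem.Dict Int Int) (h : n ∈ d.keys) : (pvInnerA n rs d).keys = d.keys := by
  induction rs generalizing d with
  | nil => rfl
  | cons r rest ih =>
    simp only [pvInnerA]
    split
    · have hc : d.contains n = true := (PySem.Dict.contains_iff_mem_keys d n).2 h
      have hk : (d.modify n 0 (· + 1)).keys = d.keys := by
        rw [PySem.Dict.keys_modify]; exact PySem.Dict.keys_insert_of_contains d _ hc
      rw [ih _ (by rw [hk]; exact h), hk]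
    · rfl

theorem pvInnerA_getD (n : Int) (rs : List (List (String × List Int)))
    (d : PySem.Dict Int Int) (m : Int) :
    (pvInnerA n rs d).getD m 0 = d.getD m 0 + (if m = n then pvPc n rs else 0) := by
  induction rs generalizing d with
  | nil => simp [pvInnerA, pvPc]
  | cons r rest ih =>
    simp only [pvInnerA, pvPc]
    split
    · rw [ih, PySem.Dict.getD_modify]
      split <;> simp_all <;> ring
    · simp

theorem pvFoldA_keys (ms : List Int) (rs : List (List (String × List Int)))
    (d : PySem.Dict Int Int) (h : ∀ m ∈ ms, m ∈ d.keys) :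
    (ms.foldl (fun d n => pvInnerA n rs d) d).keys = d.keys := by
  induction ms generalizing d with
  | nil => rfl
  | cons k ms ih =>
    simp only [List.foldl_cons]
    have hk := pvInnerA_keys k rs d (h k (by simp))
    rw [ih _ (by intro m hm; rw [hk]; exact h m (by simp [hm])), hk]

theorem pvFoldA_getD (ms : List Int) (rs : List (List (String × List Int)))
    (d : PySem.Dict Int Int) (m : Int) :
    (ms.foldl (fun d n => pvInnerA n rs d) d).getD m 0
      = d.getD m 0 + (ms.count m : Int) * pvPc m rs := by
  induction ms generalizing d with
  | nil => simp
  | cons k ms ih =>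
    simp only [List.foldl_cons]
    rw [ih, pvInnerA_getD]
    by_cases hm : m = k
    · subst hm; simp; ring
    · simp [hm, Ne.symm hm]

-- the pair-fold of pvStepB splits into a filter and a modify-fold
theorem pvStepB_fold_eq (nums : List Int) (al : List Int) (d : PySem.Dict Int Int) (acc : List Int) :
    al.foldl (fun p n => if nums.contains n then (p.1.modify n 0 (· + 1), p.2 ++ [n]) else p) (d, acc)
      = ((al.filter (fun n => nums.contains n)).foldl (fun d n => d.modify n 0 (· + 1)) d,
         acc ++ al.filter (fun n => nums.contains n)) := by
  induction al generalizing d acc with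
  | nil => simp
  | cons a al ih =>
    simp only [List.foldl_cons, List.filter_cons]
    by_cases ha : nums.contains a = true
    · rw [if_pos ha, if_pos ha, ih, List.foldl_cons]
      simp
    · rw [if_neg ha, if_neg (by simpa using ha), ih]

theorem pvStepB_eq (nums : List Int) (d : PySem.Dict Int Int) (alive : List Int) :
    pvStepB nums d alive
      = ((alive.filter (fun n => nums.contains n)).foldl (fun d n => d.modify n 0 (· + 1)) d,
         alive.filter (fun n => nums.contains n)) := by
  have := pvStepB_fold_eq nums alive d []
  simpa [pvStepB] using this

theorem pvSet_update_of_subset (s : PySem.Set Int) (xs : List Int)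
    (h : ∀ x ∈ xs, x ∈ s) : PySem.Set.update s xs = s := by
  induction xs generalizing s with
  | nil => rfl
  | cons x xs ih =>
    have : PySem.Set.add s x = s := PySem.Set.add_of_mem (h x (by simp))
    simp only [PySem.Set.update, List.foldl_cons, this]
    exact ih s (fun y hy => h y (by simp [hy]))

theorem pvLoopB_char (rs : List (List (String × List Int))) (alive : List Int)
    (d : PySem.Dict Int Int) (hsub : ∀ a ∈ alive, a ∈ d.keys) (hnd : alive.Nodup) :
    (pvLoopB rs d alive).keys = d.keys ∧
      ∀ m, (pvLoopB rs d alive).getD m 0 = d.getD m 0 + (if m ∈ alive then pvPc m rs else 0) := by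
  induction rs generalizing d alive with
  | nil =>
    refine ⟨rfl, fun m => ?_⟩
    simp [pvLoopB, pvPc]
  | cons r rest ih =>
    cases alive with
    | nil =>
      refine ⟨rfl, fun m => ?_⟩
      simp [pvLoopB]
    | cons a al =>
      have hstep : pvLoopB (r :: rest) d (a :: al)
          = pvLoopB rest (pvStepB (pvNums r) d (a :: al)).1 (pvStepB (pvNums r) d (a :: al)).2 := rfl
      set F := (a :: al).filter (fun n => (pvNums r).contains n) with hF
      set d' := F.foldl (fun d n => d.modify n 0 (· + 1)) d with hd'
      have hproj1 : (pvStepB (pvNums r) d (a :: al)).1 = d' := by rw [pvStepB_eq]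
      have hproj2 : (pvStepB (pvNums r) d (a :: al)).2 = F := by rw [pvStepB_eq]
      have hFsub : ∀ x ∈ F, x ∈ a :: al := fun x hx => List.mem_of_mem_filter hx
      have hndF : F.Nodup := hnd.filter _
      have hkeys : d'.keys = d.keys := by
        rw [hd', PySem.Dict.keys_foldl_modify]
        exact pvSet_update_of_subset _ _ (fun x hx => hsub x (hFsub x hx))
      have hget : ∀ m, d'.getD m 0 = d.getD m 0 + (F.count m : Int) := by
        intro m; rw [hd', PySem.Dict.getD_foldl_modify_add_one]
      obtain ⟨ihk, ihg⟩ := ih F d' (fun x hx => hkeys ▸ hsub x (hFsub x hx)) hndF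
      rw [hstep, hproj1, hproj2]
      refine ⟨by rw [ihk, hkeys], ?_⟩
      intro m
      rw [ihg m, hget m]
      have hcount : m ∈ F → F.count m = 1 := by
        intro hm
        have h1 := (List.nodup_iff_count_le_one.1 hndF) m
        have h2 := List.count_pos_iff.2 hm
        omega
      by_cases hma : m ∈ a :: al
      · by_cases hmc : (pvNums r).contains m = true
        · have hmF : m ∈ F := by rw [hF]; exact List.mem_filter.2 ⟨hma, by simpa using hmc⟩
          simp only [pvPc, hmc, if_true, if_pos hmF, if_pos hma, hcount hmF]
          push_cast; ring
        · have hmF : m ∉ F := by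
            rw [hF]; intro h; exact hmc (by simpa using (List.mem_filter.1 h).2)
          have hmc' : m ∉ pvNums r := by simpa using hmc
          simp [pvPc, hmc', hmF, hma, List.count_eq_zero.2 hmF]
      · have hmF : m ∉ F := fun h => hma (hFsub m h)
        simp [hmF, hma, List.count_eq_zero.2 hmF]

theorem pv_main (rs : List (List (String × List Int))) :
    calcular_consecutivos_py rs = calcular_consecutivos_py_alt rs := by
  have hinit_keys : pvInit.keys = pvL := pvInit_keys
  have hsub : ∀ a ∈ pvL, a ∈ pvInit.keys := by rw [hinit_keys]; exact fun a ha => ha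
  -- A's final dict
  have hAkeys : ((pvL.foldl (fun d n => pvInnerA n rs d) pvInit)).keys = pvL := by
    rw [pvFoldA_keys pvL rs pvInit hsub, hinit_keys]
  have hAget : ∀ m, ((pvL.foldl (fun d n => pvInnerA n rs d) pvInit)).getD m 0
      = pvInit.getD m 0 + (pvL.count m : Int) * pvPc m rs := fun m => pvFoldA_getD pvL rs pvInit m
  -- B's final dict
  obtain ⟨hBkeys, hBget⟩ := pvLoopB_char rs pvL pvInit hsub pvL_nodup
  have hAnodup : ((pvL.foldl (fun d n => pvInnerA n rs d) pvInit)).keys.Nodup := by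
    rw [hAkeys]; exact pvL_nodup
  have hBnodup : (pvLoopB rs pvInit pvL).keys.Nodup := by
    rw [hBkeys, hinit_keys]; exact pvL_nodup
  show ((PySem.List.pyRange 1 26 1).foldl (fun d n => pvInnerA n rs d)
      ((PySem.List.pyRange 1 26 1).foldl (fun d n => d.insert n 0) PySem.Dict.empty)).items
    = (pvLoopB rs ((PySem.List.pyRange 1 26 1).foldl (fun d n => d.insert n 0) PySem.Dict.empty)
        (PySem.List.pyRange 1 26 1)).items
  rw [show (PySem.List.pyRange 1 26 1).foldl (fun d n => d.insert n 0) PySem.Dict.empty = pvInit from rfl,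
      show PySem.List.pyRange 1 26 1 = pvL from rfl]
  rw [PySem.Dict.items_eq_map_keys _ hAnodup 0, PySem.Dict.items_eq_map_keys _ hBnodup 0,
      hAkeys, hBkeys, hinit_keys]
  refine List.map_congr_left ?_
  intro m hm
  have hc : pvL.count m = 1 := by
    have h1 := (List.nodup_iff_count_le_one.1 pvL_nodup) m
    have h2 := List.count_pos_iff.2 hm
    omega
  rw [hAget m, hBget m, pvInit_getD m, hc, if_pos hm]
  push_cast; ring_nf

-- ===== VERDICT (by name: the statement is the Claim_ definition above) =====
theorem calcular_consecutivos_py_spec : Claim_equal_calcular_consecutivos_py := by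
  intro rs _ _
  unfold Spec_calcular_consecutivos_py
  exact pv_main rs
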